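-- pv_equiv track=rewrite | github.com/leemhyungyu/Baekjoon-Programmers | CodeTree/고대 문명 유적 탐사.py | spinArray
-- ===== SOURCE A (Python) =====
-- def spinArray(degree, choice, array):
--     newArray = [[0 for _ in range(5)] for _ in range(5)]
--     x, y = choice[0] - 1, choice[1] - 1
--     for i in range(5):
--         for j in range(5):
--             newArray[i][j] = array[i][j]
--
--     for _ in range(degree // 90):
--         temp = newArray[x][y + 2]
--         newArray[x][y + 2] = newArray[x][y]
--         newArray[x][y] = newArray[x + 2][y]
--         newArray[x + 2][y] = newArray[x + 2][y+ 2]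
--         newArray[x + 2][y + 2] = temp
--         temp = newArray[x + 1][y + 2]
--         newArray[x + 1][y + 2] = newArray[x][y + 1]
--         newArray[x][y + 1] = newArray[x + 1][y]
--         newArray[x + 1][y] = newArray[x + 2][y + 1]
--         newArray[x + 2][y + 1] = temp
--
--     return newArray
-- ===== SOURCE B (Python) =====
-- def spinArray(degree, choice, array):
--     newArray = [[array[i][j] for j in range(5)] for i in range(5)]
--     x, y = choice[0] - 1, choice[1] - 1
--     turns = degree // 90
--     if turns > 0:
--         sub = [row[y:y + 3] for row in newArray[x:x + 3]]
--         for _ in range(turns):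
--             sub = [list(r) for r in zip(*reversed(sub))]
--         for i in range(3):
--             for j in range(3):
--                 newArray[x + i][y + j] = sub[i][j]
--     return newArray
-- ===== Notes on version B (the rewrite author's own statement) =====
-- stated objective: simpler
-- what changed: A rotates the 3x3 subgrid in place with ten hand-indexed element assignments per quarter turn; B skips the whole rotation when degree//90 yields no turns, and otherwise extracts the subgrid with list slices, rotates it with zip(*reversed(sub)) per turn, and writes it back with one nested loop.
import Mathlib
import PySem

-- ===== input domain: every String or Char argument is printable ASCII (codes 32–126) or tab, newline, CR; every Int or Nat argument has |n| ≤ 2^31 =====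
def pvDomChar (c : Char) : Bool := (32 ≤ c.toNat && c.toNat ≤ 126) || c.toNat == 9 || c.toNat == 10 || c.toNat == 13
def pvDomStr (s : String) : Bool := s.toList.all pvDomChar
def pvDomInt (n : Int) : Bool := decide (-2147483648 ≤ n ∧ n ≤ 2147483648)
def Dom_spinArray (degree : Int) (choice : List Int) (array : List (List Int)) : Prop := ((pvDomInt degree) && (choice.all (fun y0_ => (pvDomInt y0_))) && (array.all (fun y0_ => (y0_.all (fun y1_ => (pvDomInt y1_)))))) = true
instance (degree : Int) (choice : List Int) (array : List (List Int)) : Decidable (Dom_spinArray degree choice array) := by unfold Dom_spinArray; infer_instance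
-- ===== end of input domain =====

-- B rewrites A's index-shuffling rotation as: copy, extract the 3×3 subgrid by slicing, rotate it with zip(*reversed(..)), write it back (objective: simpler).

-- shared index helpers: Python's a[i][j] read / write; the `.getD` defaults and `.toNat` are
-- exact because Pre_ guarantees the indices used are nonnegative and in range.
def pyGet2 (a : List (List Int)) (i j : Int) : Int :=
  (PySem.List.pyGet? ((PySem.List.pyGet? a i).getD []) j).getD 0
def pySet2 (a : List (List Int)) (i j : Int) (v : Int) : List (List Int) :=
  a.modify i.toNat (fun row => row.modify j.toNat (fun _ => v))

-- ===== PORT A =====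
-- the element-by-element copy loop of A
def copyA (array : List (List Int)) : List (List Int) :=
  (PySem.List.pyRange 0 5 1).foldl (fun na i =>
    (PySem.List.pyRange 0 5 1).foldl (fun na j => pySet2 na i j (pyGet2 array i j)) na)
    (List.replicate 5 (List.replicate 5 (0:Int)))

-- the body of A's rotation loop: ten sequential assignments
def stepA (x y : Int) (na0 : List (List Int)) : List (List Int) :=
  let temp := pyGet2 na0 x (y+2)
  let na1 := pySet2 na0 x (y+2) (pyGet2 na0 x y)
  let na2 := pySet2 na1 x y (pyGet2 na1 (x+2) y)
  let na3 := pySet2 na2 (x+2) y (pyGet2 na2 (x+2) (y+2))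
  let na4 := pySet2 na3 (x+2) (y+2) temp
  let temp2 := pyGet2 na4 (x+1) (y+2)
  let na5 := pySet2 na4 (x+1) (y+2) (pyGet2 na4 x (y+1))
  let na6 := pySet2 na5 x (y+1) (pyGet2 na5 (x+1) y)
  let na7 := pySet2 na6 (x+1) y (pyGet2 na6 (x+2) (y+1))
  pySet2 na7 (x+2) (y+1) temp2

def spinArray (degree : Int) (choice : List Int) (array : List (List Int)) : List (List Int) :=
  let x := (PySem.List.pyGet? choice 0).getD 0 - 1
  let y := (PySem.List.pyGet? choice 1).getD 0 - 1
  let newArray := copyA array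
  (stepA x y)^[(PySem.Int.floordiv degree 90).toNat] newArray

-- ===== PORT B =====
-- B's copy: newArray = [[array[i][j] for j in range(5)] for i in range(5)]
def copyB (array : List (List Int)) : List (List Int) :=
  (PySem.List.pyRange 0 5 1).map (fun i => (PySem.List.pyRange 0 5 1).map (fun j => pyGet2 array i j))

-- zip(*reversed(s)) as a clockwise quarter turn; exact on the 3×3 grids it receives under Pre_
def rotCW (s : List (List Int)) : List (List Int) :=
  match s with
  | [[a,b,c],[d,e,f],[g,h,i]] => [[g,d,a],[h,e,b],[i,f,c]]
  | _ => []

-- sub = [row[y:y+3] for row in newArray[x:x+3]]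
def extractB (x y : Int) (g : List (List Int)) : List (List Int) :=
  (PySem.List.slice g (some x) (some (x+3))).map (fun row => PySem.List.slice row (some y) (some (y+3)))

-- for i in range(3): for j in range(3): newArray[x+i][y+j] = sub[i][j]
def writebackB (x y : Int) (sub g : List (List Int)) : List (List Int) :=
  (PySem.List.pyRange 0 3 1).foldl (fun na i =>
    (PySem.List.pyRange 0 3 1).foldl (fun na j => pySet2 na (x+i) (y+j) (pyGet2 sub i j)) na) g

def spinArray_alt (degree : Int) (choice : List Int) (array : List (List Int)) : List (List Int) :=
  let newArray := copyB array
  let x := (PySem.List.pyGet? choice 0).getD 0 - 1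
  let y := (PySem.List.pyGet? choice 1).getD 0 - 1
  let turns := PySem.Int.floordiv degree 90
  if 0 < turns then
    writebackB x y (rotCW^[turns.toNat] (extractB x y newArray)) newArray
  else newArray

-- ===== PRECONDITION & SPEC =====
-- Pre_ is the task's natural domain: a board with (at least) 5 rows of 5 columns, a choice list
-- with at least two entries, and — whenever at least one quarter turn is actually performed
-- (degree ≥ 90) — a rotation centre choice[0], choice[1] in 1..3.  It excludes boards too short
-- in either direction (A raises IndexError) and, for degree ≥ 90, out-of-range centres, where A
-- either raises (centre > 3) or returns a value only by accident of Python's negative-index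
-- wraparound (centre ≤ 0); B's slice-based extraction raises IndexError on those centres.
def Pre_spinArray (degree : Int) (choice : List Int) (array : List (List Int)) : Prop :=
  2 ≤ choice.length ∧
  5 ≤ array.length ∧ (∀ row ∈ array.take 5, 5 ≤ row.length) ∧
  (degree < 90 ∨
    ((1 ≤ (PySem.List.pyGet? choice 0).getD 0 ∧ (PySem.List.pyGet? choice 0).getD 0 ≤ 3) ∧
     (1 ≤ (PySem.List.pyGet? choice 1).getD 0 ∧ (PySem.List.pyGet? choice 1).getD 0 ≤ 3)))
instance (degree : Int) (choice : List Int) (array : List (List Int)) : Decidable (Pre_spinArray degree choice array) := by unfold Pre_spinArray; infer_instance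

def pvWitness_spinArray : Int × List Int × List (List Int) :=
  (90, [2, 2], [[1,2,3,4,5],[6,7,8,9,10],[11,12,13,14,15],[16,17,18,19,20],[21,22,23,24,25]])

def Spec_spinArray (degree : Int) (choice : List Int) (array : List (List Int)) (out : List (List Int)) : Prop := out = spinArray_alt degree choice array
instance (degree : Int) (choice : List Int) (array : List (List Int)) (out : List (List Int)) : Decidable (Spec_spinArray degree choice array out) := by unfold Spec_spinArray; infer_instance

-- ===== CLAIM (what is proved, stated in full; the proofs are below) =====
def Claim_equal_spinArray : Prop := ∀ (degree : Int) (choice : List Int) (array : List (List Int)), Dom_spinArray degree choice array → Pre_spinArray degree choice array → Spec_spinArray degree choice array (spinArray degree choice array)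

-- ===== LEMMAS AND PROOFS =====

-- "s is a 3×3 grid"
def Is3 (s : List (List Int)) : Prop :=
  ∃ p1 p2 p3 p4 p5 p6 p7 p8 p9 : Int, s = [[p1,p2,p3],[p4,p5,p6],[p7,p8,p9]]

lemma pyGet2_nonneg (xs : List (List Int)) (i j : Int) (hi : 0 ≤ i) (hj : 0 ≤ j) :
    pyGet2 xs i j = ((xs[i.toNat]?.getD ([]:List Int))[j.toNat]?).getD 0 := by
  simp [pyGet2, PySem.List.pyGet?_of_nonneg, hi, hj]

lemma row5 (r : List Int) (h : 5 ≤ r.length) :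
    ∃ x0 x1 x2 x3 x4 : Int, ∃ t : List Int, r = x0::x1::x2::x3::x4::t := by
  rcases r with _|⟨x0,_|⟨x1,_|⟨x2,_|⟨x3,_|⟨x4,t⟩⟩⟩⟩⟩ <;> simp at h
  exact ⟨x0,x1,x2,x3,x4,t,rfl⟩

set_option maxHeartbeats 1000000 in
lemma copyA_explicit (a00 a01 a02 a03 a04 a10 a11 a12 a13 a14 a20 a21 a22 a23 a24 a30 a31 a32 a33 a34 a40 a41 a42 a43 a44 : Int) (t0 t1 t2 t3 t4 : List Int) (tr : List (List Int)) :
    copyA ((a00::a01::a02::a03::a04::t0)::(a10::a11::a12::a13::a14::t1)::(a20::a21::a22::a23::a24::t2)::(a30::a31::a32::a33::a34::t3)::(a40::a41::a42::a43::a44::t4)::tr) = [[a00,a01,a02,a03,a04],[a10,a11,a12,a13,a14],[a20,a21,a22,a23,a24],[a30,a31,a32,a33,a34],[a40,a41,a42,a43,a44]] := by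
  rw [copyA, show PySem.List.pyRange 0 5 1 = [0,1,2,3,4] from by decide]
  simp only [List.foldl]
  simp [pyGet2_nonneg]
  rfl

set_option maxHeartbeats 1000000 in
lemma copyB_explicit (a00 a01 a02 a03 a04 a10 a11 a12 a13 a14 a20 a21 a22 a23 a24 a30 a31 a32 a33 a34 a40 a41 a42 a43 a44 : Int) (t0 t1 t2 t3 t4 : List Int) (tr : List (List Int)) :
    copyB ((a00::a01::a02::a03::a04::t0)::(a10::a11::a12::a13::a14::t1)::(a20::a21::a22::a23::a24::t2)::(a30::a31::a32::a33::a34::t3)::(a40::a41::a42::a43::a44::t4)::tr) = [[a00,a01,a02,a03,a04],[a10,a11,a12,a13,a14],[a20,a21,a22,a23,a24],[a30,a31,a32,a33,a34],[a40,a41,a42,a43,a44]] := by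
  rw [copyB, show PySem.List.pyRange 0 5 1 = [0,1,2,3,4] from by decide]
  simp only [List.map]
  simp [pyGet2_nonneg]

set_option maxHeartbeats 2000000 in
lemma wb_extract (x y : Int) (hx : x = 0 ∨ x = 1 ∨ x = 2) (hy : y = 0 ∨ y = 1 ∨ y = 2)
    (a00 a01 a02 a03 a04 a10 a11 a12 a13 a14 a20 a21 a22 a23 a24 a30 a31 a32 a33 a34 a40 a41 a42 a43 a44 : Int) :
    writebackB x y (extractB x y [[a00,a01,a02,a03,a04],[a10,a11,a12,a13,a14],[a20,a21,a22,a23,a24],[a30,a31,a32,a33,a34],[a40,a41,a42,a43,a44]]) [[a00,a01,a02,a03,a04],[a10,a11,a12,a13,a14],[a20,a21,a22,a23,a24],[a30,a31,a32,a33,a34],[a40,a41,a42,a43,a44]] = [[a00,a01,a02,a03,a04],[a10,a11,a12,a13,a14],[a20,a21,a22,a23,a24],[a30,a31,a32,a33,a34],[a40,a41,a42,a43,a44]] := by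
  rcases hx with rfl|rfl|rfl <;> rcases hy with rfl|rfl|rfl <;> rfl

lemma extract_Is3 (x y : Int) (hx : x = 0 ∨ x = 1 ∨ x = 2) (hy : y = 0 ∨ y = 1 ∨ y = 2)
    (a00 a01 a02 a03 a04 a10 a11 a12 a13 a14 a20 a21 a22 a23 a24 a30 a31 a32 a33 a34 a40 a41 a42 a43 a44 : Int) :
    Is3 (extractB x y [[a00,a01,a02,a03,a04],[a10,a11,a12,a13,a14],[a20,a21,a22,a23,a24],[a30,a31,a32,a33,a34],[a40,a41,a42,a43,a44]]) := by
  rcases hx with rfl|rfl|rfl <;> rcases hy with rfl|rfl|rfl <;>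
    exact ⟨_,_,_,_,_,_,_,_,_,rfl⟩

lemma rot_Is3 (s : List (List Int)) (h : Is3 s) : Is3 (rotCW s) := by
  obtain ⟨p1,p2,p3,p4,p5,p6,p7,p8,p9,rfl⟩ := h
  exact ⟨_,_,_,_,_,_,_,_,_,rfl⟩

lemma rotIter_Is3 (n : Nat) (s : List (List Int)) (h : Is3 s) : Is3 (rotCW^[n] s) := by
  induction n with
  | zero => simpa using h
  | succ n ih => rw [Function.iterate_succ_apply']; exact rot_Is3 _ ih

set_option maxHeartbeats 1000000 in
lemma wb_eval_00 (p1 p2 p3 p4 p5 p6 p7 p8 p9 : Int) (a00 a01 a02 a03 a04 a10 a11 a12 a13 a14 a20 a21 a22 a23 a24 a30 a31 a32 a33 a34 a40 a41 a42 a43 a44 : Int) :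
    writebackB 0 0 [[p1,p2,p3],[p4,p5,p6],[p7,p8,p9]] [[a00,a01,a02,a03,a04],[a10,a11,a12,a13,a14],[a20,a21,a22,a23,a24],[a30,a31,a32,a33,a34],[a40,a41,a42,a43,a44]] = [[p1,p2,p3,a03,a04],[p4,p5,p6,a13,a14],[p7,p8,p9,a23,a24],[a30,a31,a32,a33,a34],[a40,a41,a42,a43,a44]] := by rfl

set_option maxHeartbeats 1000000 in
lemma step_eval_00 (a00 a01 a02 a03 a04 a10 a11 a12 a13 a14 a20 a21 a22 a23 a24 a30 a31 a32 a33 a34 a40 a41 a42 a43 a44 : Int) :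
    stepA 0 0 [[a00,a01,a02,a03,a04],[a10,a11,a12,a13,a14],[a20,a21,a22,a23,a24],[a30,a31,a32,a33,a34],[a40,a41,a42,a43,a44]] = [[a20,a10,a00,a03,a04],[a21,a11,a01,a13,a14],[a22,a12,a02,a23,a24],[a30,a31,a32,a33,a34],[a40,a41,a42,a43,a44]] := by rfl

set_option maxHeartbeats 1000000 in
lemma wb_eval_01 (p1 p2 p3 p4 p5 p6 p7 p8 p9 : Int) (a00 a01 a02 a03 a04 a10 a11 a12 a13 a14 a20 a21 a22 a23 a24 a30 a31 a32 a33 a34 a40 a41 a42 a43 a44 : Int) :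
    writebackB 0 1 [[p1,p2,p3],[p4,p5,p6],[p7,p8,p9]] [[a00,a01,a02,a03,a04],[a10,a11,a12,a13,a14],[a20,a21,a22,a23,a24],[a30,a31,a32,a33,a34],[a40,a41,a42,a43,a44]] = [[a00,p1,p2,p3,a04],[a10,p4,p5,p6,a14],[a20,p7,p8,p9,a24],[a30,a31,a32,a33,a34],[a40,a41,a42,a43,a44]] := by rfl

set_option maxHeartbeats 1000000 in
lemma step_eval_01 (a00 a01 a02 a03 a04 a10 a11 a12 a13 a14 a20 a21 a22 a23 a24 a30 a31 a32 a33 a34 a40 a41 a42 a43 a44 : Int) :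
    stepA 0 1 [[a00,a01,a02,a03,a04],[a10,a11,a12,a13,a14],[a20,a21,a22,a23,a24],[a30,a31,a32,a33,a34],[a40,a41,a42,a43,a44]] = [[a00,a21,a11,a01,a04],[a10,a22,a12,a02,a14],[a20,a23,a13,a03,a24],[a30,a31,a32,a33,a34],[a40,a41,a42,a43,a44]] := by rfl

set_option maxHeartbeats 1000000 in
lemma wb_eval_02 (p1 p2 p3 p4 p5 p6 p7 p8 p9 : Int) (a00 a01 a02 a03 a04 a10 a11 a12 a13 a14 a20 a21 a22 a23 a24 a30 a31 a32 a33 a34 a40 a41 a42 a43 a44 : Int) :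
    writebackB 0 2 [[p1,p2,p3],[p4,p5,p6],[p7,p8,p9]] [[a00,a01,a02,a03,a04],[a10,a11,a12,a13,a14],[a20,a21,a22,a23,a24],[a30,a31,a32,a33,a34],[a40,a41,a42,a43,a44]] = [[a00,a01,p1,p2,p3],[a10,a11,p4,p5,p6],[a20,a21,p7,p8,p9],[a30,a31,a32,a33,a34],[a40,a41,a42,a43,a44]] := by rfl

set_option maxHeartbeats 1000000 in
lemma step_eval_02 (a00 a01 a02 a03 a04 a10 a11 a12 a13 a14 a20 a21 a22 a23 a24 a30 a31 a32 a33 a34 a40 a41 a42 a43 a44 : Int) :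
    stepA 0 2 [[a00,a01,a02,a03,a04],[a10,a11,a12,a13,a14],[a20,a21,a22,a23,a24],[a30,a31,a32,a33,a34],[a40,a41,a42,a43,a44]] = [[a00,a01,a22,a12,a02],[a10,a11,a23,a13,a03],[a20,a21,a24,a14,a04],[a30,a31,a32,a33,a34],[a40,a41,a42,a43,a44]] := by rfl

set_option maxHeartbeats 1000000 in
lemma wb_eval_10 (p1 p2 p3 p4 p5 p6 p7 p8 p9 : Int) (a00 a01 a02 a03 a04 a10 a11 a12 a13 a14 a20 a21 a22 a23 a24 a30 a31 a32 a33 a34 a40 a41 a42 a43 a44 : Int) :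
    writebackB 1 0 [[p1,p2,p3],[p4,p5,p6],[p7,p8,p9]] [[a00,a01,a02,a03,a04],[a10,a11,a12,a13,a14],[a20,a21,a22,a23,a24],[a30,a31,a32,a33,a34],[a40,a41,a42,a43,a44]] = [[a00,a01,a02,a03,a04],[p1,p2,p3,a13,a14],[p4,p5,p6,a23,a24],[p7,p8,p9,a33,a34],[a40,a41,a42,a43,a44]] := by rfl

set_option maxHeartbeats 1000000 in
lemma step_eval_10 (a00 a01 a02 a03 a04 a10 a11 a12 a13 a14 a20 a21 a22 a23 a24 a30 a31 a32 a33 a34 a40 a41 a42 a43 a44 : Int) :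
    stepA 1 0 [[a00,a01,a02,a03,a04],[a10,a11,a12,a13,a14],[a20,a21,a22,a23,a24],[a30,a31,a32,a33,a34],[a40,a41,a42,a43,a44]] = [[a00,a01,a02,a03,a04],[a30,a20,a10,a13,a14],[a31,a21,a11,a23,a24],[a32,a22,a12,a33,a34],[a40,a41,a42,a43,a44]] := by rfl

set_option maxHeartbeats 1000000 in
lemma wb_eval_11 (p1 p2 p3 p4 p5 p6 p7 p8 p9 : Int) (a00 a01 a02 a03 a04 a10 a11 a12 a13 a14 a20 a21 a22 a23 a24 a30 a31 a32 a33 a34 a40 a41 a42 a43 a44 : Int) :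
    writebackB 1 1 [[p1,p2,p3],[p4,p5,p6],[p7,p8,p9]] [[a00,a01,a02,a03,a04],[a10,a11,a12,a13,a14],[a20,a21,a22,a23,a24],[a30,a31,a32,a33,a34],[a40,a41,a42,a43,a44]] = [[a00,a01,a02,a03,a04],[a10,p1,p2,p3,a14],[a20,p4,p5,p6,a24],[a30,p7,p8,p9,a34],[a40,a41,a42,a43,a44]] := by rfl

set_option maxHeartbeats 1000000 in
lemma step_eval_11 (a00 a01 a02 a03 a04 a10 a11 a12 a13 a14 a20 a21 a22 a23 a24 a30 a31 a32 a33 a34 a40 a41 a42 a43 a44 : Int) :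
    stepA 1 1 [[a00,a01,a02,a03,a04],[a10,a11,a12,a13,a14],[a20,a21,a22,a23,a24],[a30,a31,a32,a33,a34],[a40,a41,a42,a43,a44]] = [[a00,a01,a02,a03,a04],[a10,a31,a21,a11,a14],[a20,a32,a22,a12,a24],[a30,a33,a23,a13,a34],[a40,a41,a42,a43,a44]] := by rfl

set_option maxHeartbeats 1000000 in
lemma wb_eval_12 (p1 p2 p3 p4 p5 p6 p7 p8 p9 : Int) (a00 a01 a02 a03 a04 a10 a11 a12 a13 a14 a20 a21 a22 a23 a24 a30 a31 a32 a33 a34 a40 a41 a42 a43 a44 : Int) :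
    writebackB 1 2 [[p1,p2,p3],[p4,p5,p6],[p7,p8,p9]] [[a00,a01,a02,a03,a04],[a10,a11,a12,a13,a14],[a20,a21,a22,a23,a24],[a30,a31,a32,a33,a34],[a40,a41,a42,a43,a44]] = [[a00,a01,a02,a03,a04],[a10,a11,p1,p2,p3],[a20,a21,p4,p5,p6],[a30,a31,p7,p8,p9],[a40,a41,a42,a43,a44]] := by rfl

set_option maxHeartbeats 1000000 in
lemma step_eval_12 (a00 a01 a02 a03 a04 a10 a11 a12 a13 a14 a20 a21 a22 a23 a24 a30 a31 a32 a33 a34 a40 a41 a42 a43 a44 : Int) :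
    stepA 1 2 [[a00,a01,a02,a03,a04],[a10,a11,a12,a13,a14],[a20,a21,a22,a23,a24],[a30,a31,a32,a33,a34],[a40,a41,a42,a43,a44]] = [[a00,a01,a02,a03,a04],[a10,a11,a32,a22,a12],[a20,a21,a33,a23,a13],[a30,a31,a34,a24,a14],[a40,a41,a42,a43,a44]] := by rfl

set_option maxHeartbeats 1000000 in
lemma wb_eval_20 (p1 p2 p3 p4 p5 p6 p7 p8 p9 : Int) (a00 a01 a02 a03 a04 a10 a11 a12 a13 a14 a20 a21 a22 a23 a24 a30 a31 a32 a33 a34 a40 a41 a42 a43 a44 : Int) :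
    writebackB 2 0 [[p1,p2,p3],[p4,p5,p6],[p7,p8,p9]] [[a00,a01,a02,a03,a04],[a10,a11,a12,a13,a14],[a20,a21,a22,a23,a24],[a30,a31,a32,a33,a34],[a40,a41,a42,a43,a44]] = [[a00,a01,a02,a03,a04],[a10,a11,a12,a13,a14],[p1,p2,p3,a23,a24],[p4,p5,p6,a33,a34],[p7,p8,p9,a43,a44]] := by rfl

set_option maxHeartbeats 1000000 in
lemma step_eval_20 (a00 a01 a02 a03 a04 a10 a11 a12 a13 a14 a20 a21 a22 a23 a24 a30 a31 a32 a33 a34 a40 a41 a42 a43 a44 : Int) :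
    stepA 2 0 [[a00,a01,a02,a03,a04],[a10,a11,a12,a13,a14],[a20,a21,a22,a23,a24],[a30,a31,a32,a33,a34],[a40,a41,a42,a43,a44]] = [[a00,a01,a02,a03,a04],[a10,a11,a12,a13,a14],[a40,a30,a20,a23,a24],[a41,a31,a21,a33,a34],[a42,a32,a22,a43,a44]] := by rfl

set_option maxHeartbeats 1000000 in
lemma wb_eval_21 (p1 p2 p3 p4 p5 p6 p7 p8 p9 : Int) (a00 a01 a02 a03 a04 a10 a11 a12 a13 a14 a20 a21 a22 a23 a24 a30 a31 a32 a33 a34 a40 a41 a42 a43 a44 : Int) :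
    writebackB 2 1 [[p1,p2,p3],[p4,p5,p6],[p7,p8,p9]] [[a00,a01,a02,a03,a04],[a10,a11,a12,a13,a14],[a20,a21,a22,a23,a24],[a30,a31,a32,a33,a34],[a40,a41,a42,a43,a44]] = [[a00,a01,a02,a03,a04],[a10,a11,a12,a13,a14],[a20,p1,p2,p3,a24],[a30,p4,p5,p6,a34],[a40,p7,p8,p9,a44]] := by rfl

set_option maxHeartbeats 1000000 in
lemma step_eval_21 (a00 a01 a02 a03 a04 a10 a11 a12 a13 a14 a20 a21 a22 a23 a24 a30 a31 a32 a33 a34 a40 a41 a42 a43 a44 : Int) :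
    stepA 2 1 [[a00,a01,a02,a03,a04],[a10,a11,a12,a13,a14],[a20,a21,a22,a23,a24],[a30,a31,a32,a33,a34],[a40,a41,a42,a43,a44]] = [[a00,a01,a02,a03,a04],[a10,a11,a12,a13,a14],[a20,a41,a31,a21,a24],[a30,a42,a32,a22,a34],[a40,a43,a33,a23,a44]] := by rfl

set_option maxHeartbeats 1000000 in
lemma wb_eval_22 (p1 p2 p3 p4 p5 p6 p7 p8 p9 : Int) (a00 a01 a02 a03 a04 a10 a11 a12 a13 a14 a20 a21 a22 a23 a24 a30 a31 a32 a33 a34 a40 a41 a42 a43 a44 : Int) :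
    writebackB 2 2 [[p1,p2,p3],[p4,p5,p6],[p7,p8,p9]] [[a00,a01,a02,a03,a04],[a10,a11,a12,a13,a14],[a20,a21,a22,a23,a24],[a30,a31,a32,a33,a34],[a40,a41,a42,a43,a44]] = [[a00,a01,a02,a03,a04],[a10,a11,a12,a13,a14],[a20,a21,p1,p2,p3],[a30,a31,p4,p5,p6],[a40,a41,p7,p8,p9]] := by rfl

set_option maxHeartbeats 1000000 in
lemma step_eval_22 (a00 a01 a02 a03 a04 a10 a11 a12 a13 a14 a20 a21 a22 a23 a24 a30 a31 a32 a33 a34 a40 a41 a42 a43 a44 : Int) :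
    stepA 2 2 [[a00,a01,a02,a03,a04],[a10,a11,a12,a13,a14],[a20,a21,a22,a23,a24],[a30,a31,a32,a33,a34],[a40,a41,a42,a43,a44]] = [[a00,a01,a02,a03,a04],[a10,a11,a12,a13,a14],[a20,a21,a42,a32,a22],[a30,a31,a43,a33,a23],[a40,a41,a44,a34,a24]] := by rfl

set_option maxHeartbeats 1000000 in
lemma rotCW_explicit (p1 p2 p3 p4 p5 p6 p7 p8 p9 : Int) :
    rotCW [[p1,p2,p3],[p4,p5,p6],[p7,p8,p9]] = [[p7,p4,p1],[p8,p5,p2],[p9,p6,p3]] := rfl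

set_option maxHeartbeats 2000000 in
lemma step_wb (x y : Int) (hx : x = 0 ∨ x = 1 ∨ x = 2) (hy : y = 0 ∨ y = 1 ∨ y = 2)
    (p1 p2 p3 p4 p5 p6 p7 p8 p9 : Int) (a00 a01 a02 a03 a04 a10 a11 a12 a13 a14 a20 a21 a22 a23 a24 a30 a31 a32 a33 a34 a40 a41 a42 a43 a44 : Int) :
    stepA x y (writebackB x y [[p1,p2,p3],[p4,p5,p6],[p7,p8,p9]] [[a00,a01,a02,a03,a04],[a10,a11,a12,a13,a14],[a20,a21,a22,a23,a24],[a30,a31,a32,a33,a34],[a40,a41,a42,a43,a44]]) = writebackB x y (rotCW [[p1,p2,p3],[p4,p5,p6],[p7,p8,p9]]) [[a00,a01,a02,a03,a04],[a10,a11,a12,a13,a14],[a20,a21,a22,a23,a24],[a30,a31,a32,a33,a34],[a40,a41,a42,a43,a44]] := by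
  rw [rotCW_explicit]
  rcases hx with rfl|rfl|rfl <;> rcases hy with rfl|rfl|rfl
  · rw [wb_eval_00, step_eval_00, wb_eval_00]
  · rw [wb_eval_01, step_eval_01, wb_eval_01]
  · rw [wb_eval_02, step_eval_02, wb_eval_02]
  · rw [wb_eval_10, step_eval_10, wb_eval_10]
  · rw [wb_eval_11, step_eval_11, wb_eval_11]
  · rw [wb_eval_12, step_eval_12, wb_eval_12]
  · rw [wb_eval_20, step_eval_20, wb_eval_20]
  · rw [wb_eval_21, step_eval_21, wb_eval_21]
  · rw [wb_eval_22, step_eval_22, wb_eval_22]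

lemma main_iter (x y : Int) (hx : x = 0 ∨ x = 1 ∨ x = 2) (hy : y = 0 ∨ y = 1 ∨ y = 2)
    (n : Nat) (a00 a01 a02 a03 a04 a10 a11 a12 a13 a14 a20 a21 a22 a23 a24 a30 a31 a32 a33 a34 a40 a41 a42 a43 a44 : Int) :
    (stepA x y)^[n] [[a00,a01,a02,a03,a04],[a10,a11,a12,a13,a14],[a20,a21,a22,a23,a24],[a30,a31,a32,a33,a34],[a40,a41,a42,a43,a44]] = writebackB x y (rotCW^[n] (extractB x y [[a00,a01,a02,a03,a04],[a10,a11,a12,a13,a14],[a20,a21,a22,a23,a24],[a30,a31,a32,a33,a34],[a40,a41,a42,a43,a44]])) [[a00,a01,a02,a03,a04],[a10,a11,a12,a13,a14],[a20,a21,a22,a23,a24],[a30,a31,a32,a33,a34],[a40,a41,a42,a43,a44]] := by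
  induction n with
  | zero =>
    simpa using (wb_extract x y hx hy a00 a01 a02 a03 a04 a10 a11 a12 a13 a14 a20 a21 a22 a23 a24 a30 a31 a32 a33 a34 a40 a41 a42 a43 a44).symm
  | succ n ih =>
    rw [Function.iterate_succ_apply', ih, Function.iterate_succ_apply']
    obtain ⟨p1,p2,p3,p4,p5,p6,p7,p8,p9, hs⟩ := rotIter_Is3 n _ (extract_Is3 x y hx hy a00 a01 a02 a03 a04 a10 a11 a12 a13 a14 a20 a21 a22 a23 a24 a30 a31 a32 a33 a34 a40 a41 a42 a43 a44)
    rw [hs]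
    exact step_wb x y hx hy p1 p2 p3 p4 p5 p6 p7 p8 p9 a00 a01 a02 a03 a04 a10 a11 a12 a13 a14 a20 a21 a22 a23 a24 a30 a31 a32 a33 a34 a40 a41 a42 a43 a44

-- ===== VERDICT (by name: the statement is the Claim_ definition above) =====
set_option maxHeartbeats 1000000 in
theorem spinArray_spec : Claim_equal_spinArray := by
  intro degree choice array _ hpre
  obtain ⟨hc, ha, hrows, hch⟩ := hpre
  rcases choice with _|⟨c0,choice⟩; · simp at hc
  rcases choice with _|⟨c1,crest⟩; · simp at hc
  rcases array with _|⟨r0,array⟩; · simp at ha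
  rcases array with _|⟨r1,array⟩; · simp at ha
  rcases array with _|⟨r2,array⟩; · simp at ha
  rcases array with _|⟨r3,array⟩; · simp at ha
  rcases array with _|⟨r4,tr⟩; · simp at ha
  simp only [List.take, List.mem_cons, forall_eq_or_imp] at hrows
  obtain ⟨h0, h1, h2, h3, h4, -⟩ := hrows
  obtain ⟨a00,a01,a02,a03,a04,t0,rfl⟩ := row5 _ h0
  obtain ⟨a10,a11,a12,a13,a14,t1,rfl⟩ := row5 _ h1
  obtain ⟨a20,a21,a22,a23,a24,t2,rfl⟩ := row5 _ h2
  obtain ⟨a30,a31,a32,a33,a34,t3,rfl⟩ := row5 _ h3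
  obtain ⟨a40,a41,a42,a43,a44,t4,rfl⟩ := row5 _ h4
  have hg0 : (PySem.List.pyGet? (c0::c1::crest) 0).getD 0 = c0 := by
    rw [PySem.List.pyGet?_zero_cons]; rfl
  have hg1 : (PySem.List.pyGet? (c0::c1::crest) 1).getD 0 = c1 := by
    simp [pysem]
  rw [hg0, hg1] at hch
  unfold Spec_spinArray spinArray spinArray_alt
  rw [hg0, hg1, copyA_explicit, copyB_explicit]
  by_cases hdeg : degree < 90
  · have hlt : PySem.Int.floordiv degree 90 < 1 := by
      rw [PySem.Int.floordiv_lt_iff_lt_mul (by omega)]; omega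
    have hz : (PySem.Int.floordiv degree 90).toNat = 0 := by omega
    rw [hz, if_neg (by omega)]
    rfl
  · obtain ⟨⟨h01,h02⟩,⟨h11,h12⟩⟩ := hch.resolve_left (by omega)
    have hpos : (1:Int) ≤ PySem.Int.floordiv degree 90 := by
      rw [PySem.Int.le_floordiv_iff_mul_le (by omega)]; omega
    rw [if_pos (by omega)]
    exact main_iter (c0-1) (c1-1) (by omega) (by omega) _ a00 a01 a02 a03 a04 a10 a11 a12 a13 a14 a20 a21 a22 a23 a24 a30 a31 a32 a33 a34 a40 a41 a42 a43 a44
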